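-- pv_equiv track=rewrite | github.com/marslite/DSA-review | Week_2/week2_free_answers.py | func_nine
-- ===== SOURCE A (Python) =====
-- def func_nine(nums: list[int]):
--     #For nums1 = [1,1,1,1,1] it will output 15
--     #For nums2 = [1,2,3,4,5] it will output 45
--     # The function as usual takes the lenght of list of integers nums
--     # It has a while loop condition that will keep on running untill i is no longer smaller than N
--     #Inside we have an iterative for loop that iterates from 0 to the end of the list nums
--     #then every element of nums will be added to total as a sum.
--     #Eventually when done i gets multiplied by 2
--     #In essence it is adding three times the sum of the elements of the list beofre i gets larger than N, so for nums1 total gets 5 added three times so 15, for nums2 15 added three times so 45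
--     #Runtime complexity for the while loop is O(log n) because for each iteration the i gets bigger and will will make the condition of the while loop not valid despite the size of N
--     #The second iterative for loop instead will looping untll N so O(N), so we have O(log n) * O(n) == O(n log n)
--    # Spacetime: O(1) constnat since it is the same space allocated for total when gets updated and for i when it gets uptaded too
--
--   N = len(nums)
--   total = 0
--   i = 1
--   while i < N:
--       for j in range(0, N):
--           total += nums[j]
--       i = i * 2
--   return total
-- ===== SOURCE B (Python) =====
-- def func_nine(nums: list[int]):
--     # Sum the list once, then multiply by the number of doublings of i=1 until i >= N.
--     N = len(nums)
--     s = sum(nums)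
--     k = 0
--     i = 1
--     while i < N:
--         k += 1
--         i = i * 2
--     return s * k
-- ===== Notes on version B (the rewrite author's own statement) =====
-- stated objective: faster
-- what changed: A re-sums the whole list inside every iteration of the doubling while-loop; B sums the list once and multiplies by the number of doublings, removing the inner O(N) scan.
import Mathlib
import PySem

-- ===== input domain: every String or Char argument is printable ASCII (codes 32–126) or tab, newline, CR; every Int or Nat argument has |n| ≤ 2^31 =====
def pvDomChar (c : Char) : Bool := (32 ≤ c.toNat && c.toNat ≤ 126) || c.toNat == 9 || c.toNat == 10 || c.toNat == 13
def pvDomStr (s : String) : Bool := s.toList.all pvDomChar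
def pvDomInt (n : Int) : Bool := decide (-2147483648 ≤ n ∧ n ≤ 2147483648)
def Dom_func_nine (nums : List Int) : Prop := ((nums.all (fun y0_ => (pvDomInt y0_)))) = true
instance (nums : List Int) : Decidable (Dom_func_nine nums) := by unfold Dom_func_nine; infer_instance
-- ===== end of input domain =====

-- B sums the list once and multiplies by the number of doublings of i; A re-sums inside each doubling iteration.

-- ===== PORT A =====
-- inner 'for j in range(0, N): total += nums[j]' (exact: every j is in range)
def funcNineInner (nums : List Int) (N : Int) (total : Int) : Int :=
  (PySem.List.pyRange 0 N 1).foldl (fun t j => t + PySem.List.pyGetD nums j 0) total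

-- 'while i < N: … ; i = i * 2', carrying the invariant 0 < i for termination
def funcNineWhile (nums : List Int) (N : Int) (total : Int) (i : Int) (hi : 0 < i) : Int :=
  if h : i < N then
    funcNineWhile nums N (funcNineInner nums N total) (i * 2) (by omega)
  else total
termination_by (N - i).toNat
decreasing_by omega

def func_nine (nums : List Int) : Int :=
  funcNineWhile nums (nums.length : Int) 0 1 (by omega)

-- ===== PORT B =====
-- 'while i < N: k += 1; i = i * 2'
def funcNineAltWhile (N : Int) (k : Int) (i : Int) (hi : 0 < i) : Int :=
  if h : i < N then funcNineAltWhile N (k + 1) (i * 2) (by omega) else k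
termination_by (N - i).toNat
decreasing_by omega

def func_nine_alt (nums : List Int) : Int :=
  nums.sum * funcNineAltWhile (nums.length : Int) 0 1 (by omega)

-- ===== PRECONDITION & SPEC =====
def Spec_func_nine (nums : List Int) (out : Int) : Prop := out = func_nine_alt nums
instance (nums : List Int) (out : Int) : Decidable (Spec_func_nine nums out) := by unfold Spec_func_nine; infer_instance

-- ===== CLAIM (what is proved, stated in full; the proofs are below) =====
def Claim_equal_func_nine : Prop := ∀ (nums : List Int), Dom_func_nine nums → Spec_func_nine nums (func_nine nums)

-- ===== LEMMAS AND PROOFS =====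
theorem funcNineInner_eq (nums : List Int) (total : Int) :
    funcNineInner nums (nums.length : Int) total = total + nums.sum := by
  unfold funcNineInner
  rw [PySem.List.foldl_pyRange_zero_pyGetD' nums 0 (fun t x => t + x) total]
  induction nums generalizing total with
  | nil => simp
  | cons a t ih => simp [List.foldl_cons, ih]; ring

theorem funcNineAltWhile_acc (N k i : Int) (hi : 0 < i) :
    funcNineAltWhile N k i hi = k + funcNineAltWhile N 0 i hi := by
  by_cases h : i < N
  · conv_lhs => rw [funcNineAltWhile, dif_pos h]
    conv_rhs => rw [funcNineAltWhile, dif_pos h]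
    rw [funcNineAltWhile_acc N (k + 1) (i * 2) (by omega),
        funcNineAltWhile_acc N (0 + 1) (i * 2) (by omega)]
    ring
  · conv_lhs => rw [funcNineAltWhile, dif_neg h]
    conv_rhs => rw [funcNineAltWhile, dif_neg h]
    ring
termination_by (N - i).toNat
decreasing_by all_goals omega

theorem funcNineWhile_eq (nums : List Int) (total i : Int) (hi : 0 < i) :
    funcNineWhile nums (nums.length : Int) total i hi =
      total + nums.sum * funcNineAltWhile (nums.length : Int) 0 i hi := by
  fun_induction funcNineWhile nums (nums.length : Int) total i hi with
  | case1 total i hi h ih =>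
    rw [ih, funcNineInner_eq]
    conv_rhs => rw [funcNineAltWhile, dif_pos h]
    rw [funcNineAltWhile_acc _ (0 + 1) _ (by omega)]
    ring
  | case2 total i hi h =>
    rw [funcNineAltWhile, dif_neg h]; ring

-- ===== VERDICT (by name: the statement is the Claim_ definition above) =====
theorem func_nine_spec : Claim_equal_func_nine := by
  intro nums _
  unfold Spec_func_nine func_nine func_nine_alt
  rw [funcNineWhile_eq]; ring
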